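-- pv_equiv track=rewrite | github.com/Kim-Young-Hoo/boj_algorithms | 백준/Gold/2448. 별 찍기 － 11/별 찍기 － 11.py | solution
-- ===== SOURCE A (Python) =====
-- def solution(n):
--     if n == 3:
--         return ["*", "* *", "*****"]
--
--     matrix = solution(n // 2)
--     new_matrix = []
--     for i in range(2):
--         for j in range(len(matrix)):
--             if i == 0:
--                 new_matrix.append(matrix[j])
--             else:
--                 new_matrix.append(matrix[j] + " " * ((n - 1) - (j * 2)) + matrix[j])
--     return new_matrix
-- ===== SOURCE B (Python) =====
-- def solution(n):
--     # Bottom-up: record the halving chain n, n//2, ... down to 3 (same halving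
--     # logic as the recursion), then iteratively double starting from the base triangle.
--     chain = []
--     m = n
--     while m != 3:
--         chain.append(m)
--         m //= 2
--     matrix = ["*", "* *", "*****"]
--     for m in reversed(chain):
--         matrix = matrix + [row + " " * ((m - 1) - 2 * j) + row
--                            for j, row in enumerate(matrix)]
--     return matrix
-- ===== Notes on version B (the rewrite author's own statement) =====
-- stated objective: alternative
-- what changed: Replaced A's top-down recursion on n//2 with a bottom-up iteration: B first records the halving chain from n down to 3, then repeatedly doubles the base triangle with a comprehension over enumerate, folding over the reversed chain.
import Mathlib
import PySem

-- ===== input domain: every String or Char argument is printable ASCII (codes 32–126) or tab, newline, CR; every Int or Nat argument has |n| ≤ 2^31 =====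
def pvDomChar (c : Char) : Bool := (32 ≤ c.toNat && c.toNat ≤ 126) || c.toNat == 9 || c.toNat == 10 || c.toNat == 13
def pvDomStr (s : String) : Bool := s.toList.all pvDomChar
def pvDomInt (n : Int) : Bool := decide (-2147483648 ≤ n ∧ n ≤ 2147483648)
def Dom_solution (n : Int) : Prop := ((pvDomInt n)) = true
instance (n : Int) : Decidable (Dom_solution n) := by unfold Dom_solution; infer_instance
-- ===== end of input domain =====

-- B replaces A's top-down recursion by a bottom-up doubling fold over the recorded
-- halving chain (objective: alternative decomposition; same asymptotic cost).

-- shared primitive: Python's " " * k (empty for k ≤ 0; exact, since Int.toNat clamps negatives to 0)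
def spaces (k : Int) : String := String.ofList (List.replicate k.toNat ' ')

-- ===== PORT A =====
-- A recurses on n // 2; on inputs whose halving chain never hits 3 the Python raises
-- RecursionError, modelled by fuel (64 > the ≤ 30 halvings any n in Dom ∩ Pre_ needs).
def solutionFuel : Nat → Int → List String
  | 0, _ => []
  | f + 1, n =>
    if n = 3 then ["*", "* *", "*****"]
    else
      let matrix := solutionFuel f (PySem.Int.floordiv n 2)
      (PySem.List.pyRange 0 2 1).foldl (fun acc i =>
        (PySem.List.pyRange 0 (matrix.length : Int) 1).foldl (fun acc2 j =>
          if i = 0 then acc2 ++ [PySem.List.pyGetD matrix j ""]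
          else acc2 ++ [PySem.List.pyGetD matrix j "" ++ spaces ((n - 1) - (j * 2)) ++
                        PySem.List.pyGetD matrix j ""]) acc) []

def solution (n : Int) : List String := solutionFuel 64 n

-- ===== PORT B =====
-- the halving chain n, n//2, … (stopping before 3); fuel models the Python while-loop,
-- which diverges on inputs outside Pre_
def chainFuel : Nat → Int → List Int
  | 0, _ => []
  | f + 1, m =>
    if m = 3 then []
    else m :: chainFuel f (PySem.Int.floordiv m 2)

def doubleStep (matrix : List String) (m : Int) : List String :=
  matrix ++ (PySem.List.enumerate matrix).map
    (fun jr => jr.2 ++ spaces ((m - 1) - 2 * jr.1) ++ jr.2)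

def solution_alt (n : Int) : List String :=
  ((chainFuel 64 n).reverse).foldl doubleStep ["*", "* *", "*****"]

-- ===== PRECONDITION & SPEC =====
-- Pre_: exactly the inputs whose repeated floor-halving reaches 3, i.e. n ∈ [3·2^k, 4·2^k)
-- for some k; on every other input A raises RecursionError (and B's while-loop never ends).
-- The bound k < log2 n + 1 is redundant (2^k ≤ n already forces k ≤ log2 n); it only makes Pre_ decidable.
def Pre_solution (n : Int) : Prop := ∃ k < n.toNat.log2 + 1, 3 * 2 ^ k ≤ n ∧ n < 4 * 2 ^ k
instance (n : Int) : Decidable (Pre_solution n) := by unfold Pre_solution; infer_instance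
def pvWitness_solution : Int := (12)

def Spec_solution (n : Int) (out : List String) : Prop := out = solution_alt n
instance (n : Int) (out : List String) : Decidable (Spec_solution n out) := by unfold Spec_solution; infer_instance

-- ===== CLAIM (what is proved, stated in full; the proofs are below) =====
def Claim_equal_solution : Prop := ∀ (n : Int), Dom_solution n → Pre_solution n → Spec_solution n (solution n)

-- ===== LEMMAS AND PROOFS =====

theorem floordiv_two (n : Int) : PySem.Int.floordiv n 2 = n / 2 := by
  simp [PySem.Int.floordiv]; rw [Int.fdiv_eq_ediv]; norm_num

-- A's double loop over range(2) × range(len(matrix)) is one doubling step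
theorem aStep_eq_doubleStep (matrix : List String) (n : Int) :
    (PySem.List.pyRange 0 2 1).foldl (fun acc i =>
        (PySem.List.pyRange 0 (matrix.length : Int) 1).foldl (fun acc2 j =>
          if i = 0 then acc2 ++ [PySem.List.pyGetD matrix j ""]
          else acc2 ++ [PySem.List.pyGetD matrix j "" ++ spaces ((n - 1) - (j * 2)) ++
                        PySem.List.pyGetD matrix j ""]) acc) []
      = doubleStep matrix n := by
  have h2 : PySem.List.pyRange 0 2 1 = [0, 1] := by decide
  rw [h2]
  simp only [List.foldl_cons, List.foldl_nil, reduceIte]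
  rw [PySem.List.foldl_append_singleton_eq_map]
  simp only [if_neg (show ¬(1:Int) = 0 by norm_num)]
  rw [PySem.List.foldl_append_singleton_eq_map]
  have hmap : (PySem.List.pyRange 0 (matrix.length : Int) 1).map
      (fun j => PySem.List.pyGetD matrix j "") = matrix := by
    have h := PySem.List.map_pyGetD_pyRange_zero' matrix ""
    simp at h
    exact h
  have henum : PySem.List.enumerate matrix
      = (PySem.List.pyRange 0 (matrix.length : Int) 1).map
          (fun j => (j, PySem.List.pyGetD matrix j "")) := by
    have h := @PySem.List.enumerate_eq_map_pyRange String matrix ""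
    simp [PySem.List.len] at h
    exact h
  simp only [List.nil_append, hmap, doubleStep, henum, List.map_map]
  congr 1
  apply List.map_congr_left
  intro j _
  simp [mul_comm]

-- A's fuel tracking of whether halving reaches 3
def done3 : Nat → Int → Bool
  | 0, _ => false
  | f + 1, n => n == 3 || done3 f (PySem.Int.floordiv n 2)

theorem done3_mono : ∀ g f n, f ≤ g → done3 f n = true → done3 g n = true := by
  intro g
  induction g with
  | zero => intro f n hf h; interval_cases f; simpa [done3] using h
  | succ g ih =>
    intro f n hf h
    cases f with
    | zero => simp [done3] at h
    | succ f =>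
      simp only [done3, Bool.or_eq_true, beq_iff_eq] at h ⊢
      rcases h with h | h
      · exact Or.inl h
      · exact Or.inr (ih f _ (Nat.le_of_succ_le_succ hf) h)

theorem key : ∀ f n, done3 f n = true →
    solutionFuel f n = ((chainFuel f n).reverse).foldl doubleStep ["*", "* *", "*****"] := by
  intro f
  induction f with
  | zero => intro n h; simp [done3] at h
  | succ f ih =>
    intro n h
    by_cases h3 : n = 3
    · simp [solutionFuel, chainFuel, h3]
    · simp only [done3, Bool.or_eq_true, beq_iff_eq] at h
      rcases h with h | h
      · exact absurd h h3
      · simp only [solutionFuel, chainFuel, if_neg h3]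
        rw [aStep_eq_doubleStep, ih _ h, List.reverse_cons, List.foldl_append]
        simp

theorem pre_done3 : ∀ k : Nat, ∀ n : Int,
    3 * 2 ^ k ≤ n → n < 4 * 2 ^ k → done3 (k + 1) n = true := by
  intro k
  induction k with
  | zero =>
    intro n h1 h2
    have : n = 3 := by omega
    simp [done3, this]
  | succ k ih =>
    intro n h1 h2
    have e : (2:Int) ^ (k + 1) = 2 * 2 ^ k := by ring
    have hp : (1:Int) ≤ 2 ^ k := one_le_pow₀ (by norm_num)
    rw [e] at h1 h2
    have hstep : done3 (k + 1) (PySem.Int.floordiv n 2) = true := by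
      apply ih
      · rw [floordiv_two]; omega
      · rw [floordiv_two]; omega
    have hu : done3 (k + 1 + 1) n = (n == 3 || done3 (k + 1) (PySem.Int.floordiv n 2)) := rfl
    rw [hu, hstep]
    simp

-- inside Dom, n ≤ 2^31 bounds the chain length: 3·2^k ≤ n forces k ≤ 29
theorem dom_k_small (n : Int) (k : Nat) (hd : Dom_solution n) (h1 : 3 * 2 ^ k ≤ n) : k ≤ 29 := by
  unfold Dom_solution pvDomInt at hd
  simp only [decide_eq_true_eq] at hd
  by_contra hk
  have h30 : (2:Int) ^ 30 ≤ 2 ^ k := pow_le_pow_right₀ (by norm_num) (by omega)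
  have : (3:Int) * 2 ^ 30 ≤ 3 * 2 ^ k := by linarith
  norm_num at this
  omega

-- ===== VERDICT (by name: the statement is the Claim_ definition above) =====
theorem solution_spec : Claim_equal_solution := by
  intro n hd hpre
  obtain ⟨k, _, h1, h2⟩ := hpre
  have hk := dom_k_small n k hd h1
  unfold Spec_solution solution solution_alt
  exact key 64 n (done3_mono 64 (k + 1) n (by omega) (pre_done3 k n h1 h2))
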